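-- pv_equiv track=rewrite | github.com/ohwwh/Personal_study | 알고리즘/넥토리얼 코테/관우.py | getPower
-- ===== SOURCE A (Python) =====
-- def getPower(e):
-- 	ret = 0
-- 	f = e[0]
-- 	p = 0
-- 	for i in e:
-- 		if i == f:
-- 			p += 1
-- 		else:
-- 			ret += ((ord(f)-96) ** p)
-- 			p = 1
-- 			f = i
-- 	ret += ((ord(f)-96) ** p)
-- 	return (ret)
-- ===== SOURCE B (Python) =====
-- def getPower(e):
--     # staged: pass 1 computes the run-boundary cut positions (adjacent inequality),
--     # pass 2 sums letter-value ** run-length over consecutive cut pairs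
--     n = len(e)
--     cuts = [0] + [i for i in range(1, n) if e[i] != e[i - 1]] + [n]
--     return sum((ord(e[a]) - 96) ** (b - a) for a, b in zip(cuts, cuts[1:]))
-- ===== Notes on version B (the rewrite author's own statement) =====
-- stated objective: alternative
-- what changed: Replaces A's single interleaved scan with run-tracking state (current char, run length, flush) by two staged passes: first compute the list of run-boundary cut positions from adjacent inequality e[i] != e[i-1], then sum (ord(e[a])-96)**(b-a) over consecutive cut pairs.
import Mathlib
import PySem

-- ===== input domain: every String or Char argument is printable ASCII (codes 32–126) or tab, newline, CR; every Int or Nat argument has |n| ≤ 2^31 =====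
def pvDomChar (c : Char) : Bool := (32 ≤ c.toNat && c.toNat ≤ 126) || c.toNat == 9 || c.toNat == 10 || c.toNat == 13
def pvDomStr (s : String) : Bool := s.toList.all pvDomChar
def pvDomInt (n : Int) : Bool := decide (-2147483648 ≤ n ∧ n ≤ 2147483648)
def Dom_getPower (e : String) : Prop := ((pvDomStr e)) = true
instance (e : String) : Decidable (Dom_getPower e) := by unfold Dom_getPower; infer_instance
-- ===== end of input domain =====

-- B replaces A's single interleaved scan with run-tracking state (current char, run
-- length, flush) by two staged passes: first compute the run-boundary cut positions
-- from adjacent inequality e[i] != e[i-1], then sum (ord(e[a])-96)**(b-a) over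
-- consecutive cut pairs. Same O(n) cost; different decomposition.

-- ===== PORT A =====
-- A's for-loop over e with state (ret, f, p); the final flush follows the fold.
def getPower (e : String) : Int :=
  match e.toList with
  | [] => 0   -- Python A raises IndexError here (e[0]); excluded by Pre_getPower
  | f0 :: _ =>
    let s := e.toList.foldl
      (fun (st : Int × Char × Nat) i =>
        if i == st.2.1 then (st.1, st.2.1, st.2.2 + 1)
        else (st.1 + ((st.2.1.toNat : Int) - 96) ^ st.2.2, i, 1))
      ((0 : Int), f0, (0 : Nat))
    s.1 + ((s.2.1.toNat : Int) - 96) ^ s.2.2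

-- ===== PORT B =====
-- pass 1: cuts = [0] + [i for i in range(1, n) if e[i] != e[i-1]] + [n];
-- pass 2: sum((ord(e[a])-96)**(b-a) for a, b in zip(cuts, cuts[1:])).
-- Every index reached is in range for nonempty e (on "" Python raises e[0],
-- excluded by Pre_); b - a > 0 for consecutive cuts, so .toNat is exact there.
def getPower_alt (e : String) : Int :=
  let l := e.toList
  let n : Int := (l.length : Int)
  let cuts : List Int :=
    [0] ++ (PySem.List.pyRange 1 n 1).filter
        (fun i => !(PySem.List.pyGet? l i == PySem.List.pyGet? l (i - 1))) ++ [n]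
  ((List.zip cuts (cuts.drop 1)).map
      (fun ab =>
        match PySem.List.pyGet? l ab.1 with
        | some c => ((c.toNat : Int) - 96) ^ (ab.2 - ab.1).toNat
        | none => 0)).sum

-- ===== PRECONDITION & SPEC =====
-- Pre_ excludes only the empty string, on which Python A raises IndexError (e[0]).
def Pre_getPower (e : String) : Prop := e.toList ≠ []
instance (e : String) : Decidable (Pre_getPower e) := by unfold Pre_getPower; infer_instance
def pvWitness_getPower : String := "aab"

def Spec_getPower (e : String) (out : Int) : Prop := out = getPower_alt e
instance (e : String) (out : Int) : Decidable (Spec_getPower e out) := by unfold Spec_getPower; infer_instance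

-- ===== CLAIM (what is proved, stated in full; the proofs are below) =====
def Claim_equal_getPower : Prop := ∀ (e : String), Dom_getPower e → Pre_getPower e → Spec_getPower e (getPower e)

-- ===== LEMMAS AND PROOFS =====

-- ---- A-side characterisation: A's fold computes sumRuns ----

-- sum of (c-96)^len over maximal runs; proof-side middleman between the two ports
def sumRuns : List Char → Int
  | [] => 0
  | c :: rest =>
    ((c.toNat : Int) - 96) ^ ((rest.takeWhile (· == c)).length + 1)
      + sumRuns (rest.dropWhile (· == c))
termination_by l => l.length
decreasing_by
  simp only [List.length_cons]
  exact Nat.lt_succ_of_le (List.length_dropWhile_le _ _)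

-- A's loop body, named for the proofs.
def pvStep (st : Int × Char × Nat) (i : Char) : Int × Char × Nat :=
  if i == st.2.1 then (st.1, st.2.1, st.2.2 + 1)
  else (st.1 + ((st.2.1.toNat : Int) - 96) ^ st.2.2, i, 1)

-- "remaining contribution" of A's loop from state (f, p) over the rest of the string
def pvG (f : Char) (p : Nat) : List Char → Int
  | [] => ((f.toNat : Int) - 96) ^ p
  | i :: t =>
    if i == f then pvG f (p + 1) t
    else ((f.toNat : Int) - 96) ^ p + pvG i 1 t

theorem pvFoldA (l : List Char) : ∀ (ret : Int) (f : Char) (p : Nat),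
    (l.foldl pvStep (ret, f, p)).1
      + (((l.foldl pvStep (ret, f, p)).2.1.toNat : Int) - 96) ^ (l.foldl pvStep (ret, f, p)).2.2
      = ret + pvG f p l := by
  induction l with
  | nil => intro ret f p; simp [pvG]
  | cons i t ih =>
    intro ret f p
    simp only [List.foldl_cons, pvG]
    by_cases h : i == f
    · simp only [pvStep, h, if_true]
      simp [ih]
    · have hf : (i == f) = false := by simpa using h
      simp only [pvStep, hf, Bool.false_eq_true, if_false]
      rw [ih]
      ring

theorem pvG_runs (l : List Char) : ∀ (f : Char) (p : Nat),
    pvG f p l = ((f.toNat : Int) - 96) ^ (p + (l.takeWhile (· == f)).length)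
      + sumRuns (l.dropWhile (· == f)) := by
  induction l with
  | nil => intro f p; simp [pvG, sumRuns]
  | cons i t ih =>
    intro f p
    by_cases h : i == f
    · have hf : (i == f) = true := h
      simp only [pvG, hf, if_true, List.takeWhile, List.dropWhile, List.length_cons]
      rw [ih f (p + 1)]
      ring_nf
    · have hf : (i == f) = false := by simpa using h
      simp only [pvG, hf, Bool.false_eq_true, if_false, List.takeWhile, List.dropWhile,
        List.length_nil]
      rw [ih i 1, sumRuns]
      ring_nf

theorem getPower_eq_sumRuns (e : String) (hne : e.toList ≠ []) : getPower e = sumRuns e.toList := by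
  rcases hl : e.toList with _ | ⟨c, t⟩
  · exact absurd hl hne
  · have lhs : getPower e
        = (List.foldl pvStep ((0 : Int), c, (0 : Nat)) (c :: t)).1
          + (((List.foldl pvStep ((0 : Int), c, (0 : Nat)) (c :: t)).2.1.toNat : Int) - 96)
            ^ (List.foldl pvStep ((0 : Int), c, (0 : Nat)) (c :: t)).2.2 := by
      unfold getPower
      rw [hl]
      rfl
    rw [lhs, pvFoldA (c :: t) 0 c 0]
    have h2 : pvG c 0 (c :: t) = pvG c 1 t := by simp [pvG]
    rw [h2, pvG_runs t c 1]
    simp only [sumRuns]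
    ring_nf

-- ---- B-side characterisation ----

-- the per-pair term of B's second pass
def pvTerm (l : List Char) (ab : Int × Int) : Int :=
  match PySem.List.pyGet? l ab.1 with
  | some c => ((c.toNat : Int) - 96) ^ (ab.2 - ab.1).toNat
  | none => 0

-- B's boundary predicate and cut list (without the outer 0 / n)
def pvBnd (l : List Char) (i : Int) : Bool :=
  !(PySem.List.pyGet? l i == PySem.List.pyGet? l (i - 1))

def pvBnds (l : List Char) : List Int :=
  (PySem.List.pyRange 1 (l.length : Int) 1).filter (pvBnd l)

-- sum of f over consecutive pairs of a cut list
def pvPairSum (f : Int × Int → Int) : List Int → Int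
  | a :: b :: r => f (a, b) + pvPairSum f (b :: r)
  | _ => 0

theorem zip_pairs_sum (f : Int × Int → Int) (cs : List Int) :
    ((List.zip cs (cs.drop 1)).map f).sum = pvPairSum f cs := by
  induction cs with
  | nil => simp [pvPairSum]
  | cons a t ih =>
    cases t with
    | nil => simp [pvPairSum]
    | cons b r =>
      simp only [List.drop_succ_cons, List.drop_zero, List.zip_cons_cons, List.map_cons,
        List.sum_cons, pvPairSum]
      rw [← ih]
      simp

theorem getPower_alt_eq (e : String) :
    getPower_alt e
      = pvPairSum (pvTerm e.toList) (0 :: pvBnds e.toList ++ [(e.toList.length : Int)]) := by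
  unfold getPower_alt
  rw [zip_pairs_sum]
  rfl

-- pyGet? through an append, shifted by the prefix length
theorem pyGet?_shift (r rest : List Char) (j : Int) (hj : 0 ≤ j) :
    PySem.List.pyGet? (r ++ rest) (j + (r.length : Int)) = PySem.List.pyGet? rest j := by
  have h1 : (0 : Int) ≤ j + (r.length : Int) := by omega
  rw [PySem.List.pyGet?_of_nonneg _ h1, PySem.List.pyGet?_of_nonneg _ hj]
  have h2 : (j + (r.length : Int)).toNat = r.length + j.toNat := by omega
  rw [h2, List.getElem?_append_right (by omega)]
  congr 1
  omega

-- no boundary inside a constant block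
theorem bnds_const (l : List Char) (c : Char) (h : ∀ x ∈ l, x = c) : pvBnds l = [] := by
  unfold pvBnds
  rw [List.filter_eq_nil_iff]
  intro i hi
  rw [PySem.List.mem_pyRange_one] at hi
  have e1 : PySem.List.pyGet? l i = some (l[i.toNat]) :=
    PySem.List.pyGet?_eq_some_getElem _ (by omega) (by omega)
  have e2 : PySem.List.pyGet? l (i - 1) = some (l[(i - 1).toNat]) :=
    PySem.List.pyGet?_eq_some_getElem _ (by omega) (by omega)
  have v1 : l[i.toNat] = c := h _ (List.getElem_mem _)
  have v2 : l[(i - 1).toNat] = c := h _ (List.getElem_mem _)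
  simp only [pvBnd, e1, e2, v1, v2]
  simp

theorem pyRange_shift (a b k : Int) :
    PySem.List.pyRange (a + k) (b + k) 1 = (PySem.List.pyRange a b 1).map (· + k) := by
  rw [PySem.List.pyRange_one, PySem.List.pyRange_one, List.map_map]
  have h : b + k - (a + k) = b - a := by ring
  rw [h]
  apply List.map_congr_left
  intro j _
  simp only [Function.comp_apply]
  ring

-- run decomposition of the boundary list
theorem bnds_append (c d : Char) (r rest t2 : List Char)
    (hr : ∀ x ∈ r, x = c) (hrne : r ≠ []) (hrest : rest = d :: t2) (hd : d ≠ c) :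
    pvBnds (r ++ rest) = (0 :: pvBnds rest).map (· + (r.length : Int)) := by
  have hk : 1 ≤ (r.length : Int) := by
    have := List.length_pos_iff.mpr hrne; omega
  have hm : 1 ≤ (rest.length : Int) := by
    rw [hrest]; simp only [List.length_cons]; push_cast; omega
  unfold pvBnds
  have hlen : ((r ++ rest).length : Int) = (rest.length : Int) + (r.length : Int) := by
    simp; ring
  rw [hlen]
  rw [PySem.List.pyRange_one_append 1 (r.length : Int) _ hk (by omega), List.filter_append]
  have left0 : (PySem.List.pyRange 1 (r.length : Int) 1).filter (pvBnd (r ++ rest)) = [] := by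
    rw [List.filter_eq_nil_iff]
    intro i hi
    rw [PySem.List.mem_pyRange_one] at hi
    have e1 : PySem.List.pyGet? (r ++ rest) i = some ((r ++ rest)[i.toNat]) :=
      PySem.List.pyGet?_eq_some_getElem _ (by omega) (by simp; omega)
    have e2 : PySem.List.pyGet? (r ++ rest) (i - 1) = some ((r ++ rest)[(i - 1).toNat]) :=
      PySem.List.pyGet?_eq_some_getElem _ (by omega) (by simp; omega)
    have v1 : (r ++ rest)[i.toNat]'(by simp; omega) = c := by
      rw [List.getElem_append_left (by omega)]
      exact hr _ (List.getElem_mem _)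
    have v2 : (r ++ rest)[(i - 1).toNat]'(by simp; omega) = c := by
      rw [List.getElem_append_left (by omega)]
      exact hr _ (List.getElem_mem _)
    simp only [pvBnd, e1, e2, v1, v2]
    simp
  rw [left0, List.nil_append]
  have hsplit : PySem.List.pyRange (r.length : Int) ((rest.length : Int) + (r.length : Int)) 1
      = (PySem.List.pyRange 0 (rest.length : Int) 1).map (· + (r.length : Int)) := by
    have := pyRange_shift 0 (rest.length : Int) (r.length : Int)
    simpa using this
  rw [hsplit, List.filter_map]
  rw [PySem.List.pyRange_one_cons (by omega), List.filter_cons]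
  have hb0 : pvBnd (r ++ rest) (0 + (r.length : Int)) = true := by
    have e1 : PySem.List.pyGet? (r ++ rest) (0 + (r.length : Int))
        = PySem.List.pyGet? rest 0 := by
      simpa using pyGet?_shift r rest 0 le_rfl
    have e2 : PySem.List.pyGet? (r ++ rest) (0 + (r.length : Int) - 1)
        = some ((r ++ rest)[((r.length : Int) - 1).toNat]) := by
      have := PySem.List.pyGet?_eq_some_getElem (r ++ rest) (i := (r.length : Int) - 1)
        (by omega) (by simp only [List.length_append]; push_cast; omega)
      simpa using this
    have v2 : (r ++ rest)[((r.length : Int) - 1).toNat]'(by simp; omega) = c := by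
      rw [List.getElem_append_left (by omega)]
      exact hr _ (List.getElem_mem _)
    have v1 : PySem.List.pyGet? rest 0 = some d := by
      subst hrest; exact PySem.List.pyGet?_zero_cons _ _
    simp only [pvBnd] at *
    rw [e1, e2, v1, v2]
    simp [hd]
  simp only [Function.comp_apply] at hb0 ⊢
  rw [if_pos hb0]
  have h01 : (0 : Int) + 1 = 1 := by norm_num
  rw [h01]
  congr 1
  congr 1
  apply List.filter_congr
  intro j hj
  rw [PySem.List.mem_pyRange_one] at hj
  have e1 : PySem.List.pyGet? (r ++ rest) (j + (r.length : Int))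
      = PySem.List.pyGet? rest j := pyGet?_shift r rest j (by omega)
  have e2 : PySem.List.pyGet? (r ++ rest) (j + (r.length : Int) - 1)
      = PySem.List.pyGet? rest (j - 1) := by
    have := pyGet?_shift r rest (j - 1) (by omega)
    have harg : j - 1 + (r.length : Int) = j + (r.length : Int) - 1 := by ring
    rw [harg] at this
    exact this
  simp only [Function.comp_apply, pvBnd, e1, e2]

-- shifting every cut by the prefix length drops the prefix from the terms
theorem pairSum_shift (r rest : List Char) (cs : List Int) (hcs : ∀ x ∈ cs, 0 ≤ x) :
    pvPairSum (pvTerm (r ++ rest)) (cs.map (· + (r.length : Int)))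
      = pvPairSum (pvTerm rest) cs := by
  induction cs with
  | nil => simp [pvPairSum]
  | cons a t ih =>
    cases t with
    | nil => simp [pvPairSum]
    | cons b u =>
      simp only [List.map_cons, pvPairSum]
      have ha : 0 ≤ a := hcs a (by simp)
      have hterm : pvTerm (r ++ rest) (a + (r.length : Int), b + (r.length : Int))
          = pvTerm rest (a, b) := by
        simp only [pvTerm]
        rw [pyGet?_shift r rest a ha]
        have : b + (r.length : Int) - (a + (r.length : Int)) = b - a := by ring
        rw [this]
      rw [hterm]
      congr 1
      have := ih (fun x hx => hcs x (by simp [hx]))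
      simpa using this

theorem cuts_nonneg (l : List Char) :
    ∀ x ∈ (0 : Int) :: pvBnds l ++ [(l.length : Int)], 0 ≤ x := by
  intro x hx
  rcases List.mem_cons.mp hx with h0 | hx2
  · omega
  rcases List.mem_append.mp hx2 with hb | hs
  · have hmem : (1 ≤ x ∧ x < (l.length : Int)) ∧ pvBnd l x = true := by
      simpa [pvBnds, PySem.List.mem_pyRange_one] using hb
    obtain ⟨⟨h1, _⟩, _⟩ := hmem
    omega
  · have : x = (l.length : Int) := by simpa using hs
    omega

theorem dropWhile_head_false (p : Char → Bool) : ∀ (t : List Char) (d : Char) (t2 : List Char),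
    t.dropWhile p = d :: t2 → p d = false := by
  intro t
  induction t with
  | nil => intro d t2 h; simp [List.dropWhile] at h
  | cons a u ih =>
    intro d t2 h
    by_cases hp : p a
    · rw [List.dropWhile_cons_of_pos hp] at h
      exact ih _ _ h
    · rw [List.dropWhile_cons_of_neg hp] at h
      cases h
      simpa using hp

theorem pvPairSum_cons2 (f : Int × Int → Int) (a b : Int) (r : List Int) :
    pvPairSum f (a :: b :: r) = f (a, b) + pvPairSum f (b :: r) := rfl

theorem pvPairSum_one (f : Int × Int → Int) (a : Int) : pvPairSum f [a] = 0 := rfl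

theorem pvTerm_zero (x : Char) (xs : List Char) (b : Int) :
    pvTerm (x :: xs) (0, b) = ((x.toNat : Int) - 96) ^ (b - 0).toNat := by
  simp [pvTerm]

theorem pairCuts_eq_sumRuns (l : List Char) :
    pvPairSum (pvTerm l) (0 :: pvBnds l ++ [(l.length : Int)]) = sumRuns l := by
  induction l using sumRuns.induct with
  | case1 =>
    simp [pvBnds, pvPairSum, pvTerm, sumRuns, PySem.List.pyRange_one_eq_nil,
      PySem.List.pyGet?]
  | case2 c t ih =>
    set tw := t.takeWhile (· == c) with htw
    set rest := t.dropWhile (· == c) with hrest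
    have hsplit : c :: t = (c :: tw) ++ rest := by
      simp [htw, hrest, List.takeWhile_append_dropWhile]
    have hr : ∀ x ∈ c :: tw, x = c := by
      intro x hx
      rcases List.mem_cons.mp hx with h | h
      · exact h
      · have := List.mem_takeWhile_imp h
        simpa using this
    cases hre : rest with
    | nil =>
      -- single run: no boundaries, cuts = [0, n]
      have hall : ∀ x ∈ c :: t, x = c := by
        intro x hx
        have : x ∈ (c :: tw) ++ rest := by rw [← hsplit]; exact hx
        rw [hre] at this
        simp only [List.append_nil] at this
        exact hr _ this
      rw [bnds_const _ c hall]
      have hlen2 : (((c :: t).length : Int)) = (tw.length : Int) + 1 := by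
        have := congrArg List.length hsplit
        rw [hre] at this
        simp only [List.length_cons, List.append_nil] at this
        simp only [List.length_cons]
        push_cast
        omega
      show pvPairSum (pvTerm (c :: t)) [0, ((c :: t).length : Int)] = sumRuns (c :: t)
      rw [pvPairSum_cons2, pvPairSum_one, pvTerm_zero, hlen2]
      have hexp : (((tw.length : Int) + 1 - 0)).toNat = tw.length + 1 := by omega
      rw [hexp]
      rw [show sumRuns (c :: t) = ((c.toNat : Int) - 96) ^ ((t.takeWhile (· == c)).length + 1)
            + sumRuns (t.dropWhile (· == c)) from by simp only [sumRuns]]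
      rw [← htw, ← hrest, hre]
      simp only [sumRuns]
    | cons d t2 =>
      have hdw : t.dropWhile (· == c) = d :: t2 := hrest.symm ▸ hre
      have hd : d ≠ c := by
        have hf : (fun x => x == c) d = false := dropWhile_head_false _ t d t2 hdw
        simpa using hf
      have hbnds := bnds_append c d (c :: tw) rest t2 hr (by simp) hre hd
      have key : pvPairSum (pvTerm ((c :: tw) ++ rest))
          (0 :: pvBnds ((c :: tw) ++ rest) ++ [((((c :: tw) ++ rest)).length : Int)])
          = ((c.toNat : Int) - 96) ^ (tw.length + 1) + sumRuns rest := by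
        rw [hbnds]
        have hlen : ((((c :: tw) ++ rest)).length : Int)
            = (rest.length : Int) + (((c :: tw)).length : Int) := by
          simp only [List.length_append]; push_cast; ring
        rw [hlen]
        simp only [List.map_cons, List.cons_append]
        rw [pvPairSum_cons2]
        have hterm : pvTerm (c :: (tw ++ rest))
            (0, 0 + (((c :: tw)).length : Int))
            = ((c.toNat : Int) - 96) ^ (tw.length + 1) := by
          rw [pvTerm_zero]
          congr 1
          simp only [List.length_cons]
          omega
        rw [hterm]
        congr 1
        have htail : (0 + (((c :: tw)).length : Int))
              :: (List.map (fun x => x + (((c :: tw)).length : Int)) (pvBnds rest)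
                  ++ [(rest.length : Int) + (((c :: tw)).length : Int)])
            = List.map (fun x => x + (((c :: tw)).length : Int))
                (0 :: pvBnds rest ++ [(rest.length : Int)]) := by
          simp
        rw [htail]
        have hshift := pairSum_shift (c :: tw) rest
          (0 :: pvBnds rest ++ [(rest.length : Int)]) (cuts_nonneg rest)
        rw [show (c :: tw) ++ rest = c :: (tw ++ rest) from rfl] at hshift
        rw [hshift]
        exact ih
      calc pvPairSum (pvTerm (c :: t)) (0 :: pvBnds (c :: t) ++ [((c :: t).length : Int)])
          = ((c.toNat : Int) - 96) ^ (tw.length + 1) + sumRuns rest := by rw [hsplit]; exact key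
        _ = sumRuns (c :: t) := by
            rw [show sumRuns (c :: t) = ((c.toNat : Int) - 96)
                  ^ ((t.takeWhile (· == c)).length + 1) + sumRuns (t.dropWhile (· == c))
                from by simp only [sumRuns]]

-- ===== VERDICT (by name: the statement is the Claim_ definition above) =====
theorem getPower_spec : Claim_equal_getPower := by
  intro e _ hpre
  unfold Spec_getPower
  rw [getPower_eq_sumRuns e hpre, getPower_alt_eq, pairCuts_eq_sumRuns]
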